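-- pv_equiv track=rewrite | github.com/SamahAbdelrahim/MCMC-P-WL | analysis.py | get_params_from_chains
-- ===== SOURCE A (Python) =====
-- def get_params_from_chains(chains, object_database):
--     params = {
--         'num_extrusions': [],
--         'extrusion_range': [],
--         'rotation_range': []
--     }
--
--     for chain in chains:
--         for step in chain:
--             # Extract parameters from each chain step
--             # Assuming step contains parameter values
--             if 'num_extrusions' in step:
--                 params['num_extrusions'].append(step['num_extrusions'])
--             if 'extrusion_range' in step:
--                 params['extrusion_range'].append(step['extrusion_range'])
--             if 'rotation_range' in step:
--                 params['rotation_range'].append(step['rotation_range'])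
--
--     return params
-- ===== SOURCE B (Python) =====
-- def get_params_from_chains(chains, object_database):
--     keys = ['num_extrusions', 'extrusion_range', 'rotation_range']
--     return {k: [step[k] for chain in chains for step in chain if k in step]
--             for k in keys}
-- ===== Notes on version B (the rewrite author's own statement) =====
-- stated objective: idiomatic
-- what changed: Replaces the single pass that threads three mutable lists through nested loops with a per-key dict comprehension that scans the steps once per parameter key.
import Mathlib
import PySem

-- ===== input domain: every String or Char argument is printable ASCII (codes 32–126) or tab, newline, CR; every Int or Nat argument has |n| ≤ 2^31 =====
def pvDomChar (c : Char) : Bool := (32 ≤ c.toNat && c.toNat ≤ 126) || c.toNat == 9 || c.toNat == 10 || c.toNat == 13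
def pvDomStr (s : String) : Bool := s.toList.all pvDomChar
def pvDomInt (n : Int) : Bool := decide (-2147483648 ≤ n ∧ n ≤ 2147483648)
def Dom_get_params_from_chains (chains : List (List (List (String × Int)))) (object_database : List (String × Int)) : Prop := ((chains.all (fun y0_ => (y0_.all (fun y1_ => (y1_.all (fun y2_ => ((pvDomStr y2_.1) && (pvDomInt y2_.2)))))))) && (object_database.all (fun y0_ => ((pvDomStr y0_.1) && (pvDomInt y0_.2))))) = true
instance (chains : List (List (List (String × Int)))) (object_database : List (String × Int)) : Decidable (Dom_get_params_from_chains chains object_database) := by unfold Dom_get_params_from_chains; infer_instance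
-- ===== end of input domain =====

-- B replaces A's single pass threading three mutable lists with one independent scan per parameter key (idiomatic dict comprehension); same output.


-- ===== PORT A =====
def pvStepA (s : List Int × List Int × List Int) (step : List (String × Int)) :
    List Int × List Int × List Int :=
  let s := match step.lookup "num_extrusions" with
    | some v => (s.1 ++ [v], s.2.1, s.2.2)
    | none => s
  let s := match step.lookup "extrusion_range" with
    | some v => (s.1, s.2.1 ++ [v], s.2.2)
    | none => s
  match step.lookup "rotation_range" with
    | some v => (s.1, s.2.1, s.2.2 ++ [v])
    | none => s

def get_params_from_chains (chains : List (List (List (String × Int)))) (object_database : List (String × Int)) : List (String × List Int) :=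
  let s := chains.foldl (fun s chain => chain.foldl pvStepA s) ([], [], [])
  [("num_extrusions", s.1), ("extrusion_range", s.2.1), ("rotation_range", s.2.2)]

-- ===== PORT B =====
def get_params_from_chains_alt (chains : List (List (List (String × Int)))) (object_database : List (String × Int)) : List (String × List Int) :=
  ["num_extrusions", "extrusion_range", "rotation_range"].map
    (fun k => (k, chains.flatMap (fun chain => chain.filterMap (fun step => step.lookup k))))

-- ===== PRECONDITION & SPEC =====
def Spec_get_params_from_chains (chains : List (List (List (String × Int)))) (object_database : List (String × Int)) (out : List (String × List Int)) : Prop := out = get_params_from_chains_alt chains object_database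
instance (chains : List (List (List (String × Int)))) (object_database : List (String × Int)) (out : List (String × List Int)) : Decidable (Spec_get_params_from_chains chains object_database out) := by unfold Spec_get_params_from_chains; infer_instance

-- ===== CLAIM (what is proved, stated in full; the proofs are below) =====
def Claim_equal_get_params_from_chains : Prop := ∀ (chains : List (List (List (String × Int)))) (object_database : List (String × Int)), Dom_get_params_from_chains chains object_database → Spec_get_params_from_chains chains object_database (get_params_from_chains chains object_database)

-- ===== LEMMAS AND PROOFS =====

theorem pvFoldSteps (steps : List (List (String × Int))) (s : List Int × List Int × List Int) :
    steps.foldl pvStepA s =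
      (s.1 ++ steps.filterMap (fun step => step.lookup "num_extrusions"),
       s.2.1 ++ steps.filterMap (fun step => step.lookup "extrusion_range"),
       s.2.2 ++ steps.filterMap (fun step => step.lookup "rotation_range")) := by
  induction steps generalizing s with
  | nil => simp
  | cons step rest ih =>
    simp only [List.foldl_cons, List.filterMap_cons, ih]
    unfold pvStepA
    rcases step.lookup "num_extrusions" with _ | v1 <;>
      rcases step.lookup "extrusion_range" with _ | v2 <;>
        rcases step.lookup "rotation_range" with _ | v3 <;> simp

theorem pvFoldChains (chains : List (List (List (String × Int)))) (s : List Int × List Int × List Int) :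
    chains.foldl (fun s chain => chain.foldl pvStepA s) s =
      (s.1 ++ chains.flatMap (fun chain => chain.filterMap (fun step => step.lookup "num_extrusions")),
       s.2.1 ++ chains.flatMap (fun chain => chain.filterMap (fun step => step.lookup "extrusion_range")),
       s.2.2 ++ chains.flatMap (fun chain => chain.filterMap (fun step => step.lookup "rotation_range"))) := by
  induction chains generalizing s with
  | nil => simp
  | cons chain rest ih =>
    simp only [List.foldl_cons, List.flatMap_cons]
    rw [ih, pvFoldSteps]
    simp [List.append_assoc]

-- ===== VERDICT (by name: the statement is the Claim_ definition above) =====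
theorem get_params_from_chains_spec : Claim_equal_get_params_from_chains := by
  intro chains object_database _
  unfold Spec_get_params_from_chains get_params_from_chains get_params_from_chains_alt
  simp [pvFoldChains]
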